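-- pv_equiv track=rewrite | github.com/photonics-dhl/Dirac_solver | scripts/dispatch_dirac_task.py | infer_octopus_defaults_for_case
-- ===== SOURCE A (Python) =====
-- from typing import Any, Dict, List, Optional, Tuple
--
-- def infer_octopus_defaults_for_case(case_id: str) -> Tuple[str, str]:
--     """Map case_id → (molecule, calc_mode) using atom/mode extraction."""
--     case_key = str(case_id or "").strip().lower()
--     molecule = "H2"
--     calc_mode = "gs"
--
--     # Atom extraction (handles any future atom symbol)
--     ATOM_MOLECULE = {
--         "h": "H", "he": "He", "he_pp": "He",
--         "n": "N", "na": "Na", "k": "K", "cl": "Cl",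
--         "o": "O", "c": "C", "f": "F", "s": "S",
--     }
--     for atom_key, mol in ATOM_MOLECULE.items():
--         if case_key.startswith(atom_key + "_") or case_key == atom_key:
--             molecule = mol
--             break
--
--     # Calculation mode: TD if any td-related token present
--     TD_TOKENS = {"td", "tddft", "td-dft", "casida", "absorption", "radiation", "eels", "rt"}
--     calc_tokens = {tok for tok in case_key.replace("-", "_").split("_") if tok}
--     if calc_tokens & TD_TOKENS or "td" in case_key:
--         calc_mode = "td"
--
--     return molecule, calc_mode
-- ===== SOURCE B (Python) =====
-- def infer_octopus_defaults_for_case(case_id):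
--     """Map case_id -> (molecule, calc_mode): match on the first '_'-segment + one-pass token scan."""
--     case_key = str(case_id or "").strip().lower()
--
--     match case_key.split("_", 1)[0]:
--         case "h":  molecule = "H"
--         case "he": molecule = "He"
--         case "n":  molecule = "N"
--         case "na": molecule = "Na"
--         case "k":  molecule = "K"
--         case "cl": molecule = "Cl"
--         case "o":  molecule = "O"
--         case "c":  molecule = "C"
--         case "f":  molecule = "F"
--         case "s":  molecule = "S"
--         case _:    molecule = "H2"
--
--     if "td" in case_key:
--         return molecule, "td"
--     # one pass over the characters: every token of "td" is caught above, so only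
--     # the remaining TD tokens need a delimited-token check
--     TD_REST = ("casida", "absorption", "radiation", "eels", "rt")
--     tok = ""
--     for c in case_key:
--         if c in "-_":
--             if tok in TD_REST:
--                 return molecule, "td"
--             tok = ""
--         else:
--             tok += c
--     return molecule, ("td" if tok in TD_REST else "gs")
-- ===== Notes on version B (the rewrite author's own statement) =====
-- stated objective: alternative
-- what changed: The molecule comes from a match statement on the first underscore-delimited segment (extracted once with split('_',1)[0], dropping the dead he_pp key) instead of A's startswith/equality scan over the whole atom dict, and the TD test is a single character-level pass that builds tokens on the fly and checks only the five tokens not containing 'td' (the 'td' substring check, done first with an early return, already covers td/tddft/td-dft), instead of A's replace+split, set comprehension and set intersection against all eight tokens.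
import Mathlib
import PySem

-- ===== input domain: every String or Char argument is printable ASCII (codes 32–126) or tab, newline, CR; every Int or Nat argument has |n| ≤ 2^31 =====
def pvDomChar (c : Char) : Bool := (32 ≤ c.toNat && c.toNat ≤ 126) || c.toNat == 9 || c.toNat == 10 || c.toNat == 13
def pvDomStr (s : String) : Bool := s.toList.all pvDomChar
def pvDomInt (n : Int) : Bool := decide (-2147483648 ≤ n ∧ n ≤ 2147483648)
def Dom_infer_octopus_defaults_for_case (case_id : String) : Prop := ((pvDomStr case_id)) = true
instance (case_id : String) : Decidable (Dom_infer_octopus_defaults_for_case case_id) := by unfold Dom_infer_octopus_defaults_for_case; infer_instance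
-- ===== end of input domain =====

-- B replaces A's startswith-scan over the atom dict by a match on the first '_'-segment
-- (dropping the dead "he_pp" key) and A's replace/split/set-intersection TD test by a
-- 'td'-substring early return plus ONE character-level pass that tokenizes in place and
-- checks only the five TD tokens not containing 'td'; objective: alternative.

-- ===== PORT A =====
-- str(case_id or "") is case_id itself for a str argument ('' stays ''), so the
-- normalisation is strip then lower; ports work on the code-point list (PySem.Chars).
def pvAtomsA : List (List Char × String) :=
  [(['h'], "H"), (['h','e'], "He"), (['h','e','_','p','p'], "He"), (['n'], "N"),
   (['n','a'], "Na"), (['k'], "K"), (['c','l'], "Cl"), (['o'], "O"),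
   (['c'], "C"), (['f'], "F"), (['s'], "S")]

-- the for-loop with break over ATOM_MOLECULE.items()
def pvAtomLoopA (ck : List Char) : List (List Char × String) → String
  | [] => "H2"
  | (k, mol) :: rest =>
      if PySem.Chars.startswith ck (k ++ ['_']) || ck == k then mol else pvAtomLoopA ck rest

def pvTdTokensA : PySem.Set (List Char) :=
  PySem.Set.ofList [['t','d'], ['t','d','d','f','t'], ['t','d','-','d','f','t'], ['c','a','s','i','d','a'],
                    ['a','b','s','o','r','p','t','i','o','n'], ['r','a','d','i','a','t','i','o','n'], ['e','e','l','s'], ['r','t']]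

def infer_octopus_defaults_for_case (case_id : String) : String × String :=
  let case_key := PySem.Chars.lower (PySem.Chars.strip case_id.toList)
  let molecule := pvAtomLoopA case_key pvAtomsA
  -- {tok for tok in case_key.replace("-","_").split("_") if tok}
  let calc_tokens : PySem.Set (List Char) :=
    PySem.Set.ofList (((PySem.Chars.splitOn (PySem.Chars.replace case_key ['-'] ['_']) ['_'])).filter
      (fun t => !t.isEmpty))
  let calc_mode :=
    if !(PySem.Set.inter calc_tokens pvTdTokensA).isEmpty || PySem.Chars.isIn ['t','d'] case_key
    then "td" else "gs"
  (molecule, calc_mode)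

-- ===== PORT B =====
-- the match statement on case_key.split("_", 1)[0]
def pvMoleculeOf : List Char → String
  | ['h'] => "H"
  | ['h','e'] => "He"
  | ['n'] => "N"
  | ['n','a'] => "Na"
  | ['k'] => "K"
  | ['c','l'] => "Cl"
  | ['o'] => "O"
  | ['c'] => "C"
  | ['f'] => "F"
  | ['s'] => "S"
  | _ => "H2"

-- tok in ("casida", "absorption", "radiation", "eels", "rt")
def pvIsTdRest (t : List Char) : Bool :=
  t == ['c','a','s','i','d','a'] || t == ['a','b','s','o','r','p','t','i','o','n'] ||
  t == ['r','a','d','i','a','t','i','o','n'] || t == ['e','e','l','s'] || t == ['r','t']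

-- the for-loop over case_key's characters with accumulator tok and early 'return td'
def pvScanTd : List Char → List Char → Bool
  | [], tok => pvIsTdRest tok
  | c :: rest, tok =>
      if c == '-' || c == '_' then pvIsTdRest tok || pvScanTd rest []
      else pvScanTd rest (tok ++ [c])

def infer_octopus_defaults_for_case_alt (case_id : String) : String × String :=
  let case_key := PySem.Chars.lower (PySem.Chars.strip case_id.toList)
  -- split('_', 1) never returns an empty list, so [0] is its head
  let molecule := pvMoleculeOf ((PySem.Chars.splitOnMax case_key ['_'] 1).headD [])
  if PySem.Chars.isIn ['t','d'] case_key then (molecule, "td")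
  else (molecule, if pvScanTd case_key [] then "td" else "gs")

-- ===== PRECONDITION & SPEC =====
def Spec_infer_octopus_defaults_for_case (case_id : String) (out : String × String) : Prop := out = infer_octopus_defaults_for_case_alt case_id
instance (case_id : String) (out : String × String) : Decidable (Spec_infer_octopus_defaults_for_case case_id out) := by unfold Spec_infer_octopus_defaults_for_case; infer_instance

-- ===== CLAIM (what is proved, stated in full; the proofs are below) =====
def Claim_equal_infer_octopus_defaults_for_case : Prop := ∀ (case_id : String), Dom_infer_octopus_defaults_for_case case_id → Spec_infer_octopus_defaults_for_case case_id (infer_octopus_defaults_for_case case_id)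

-- ===== LEMMAS AND PROOFS =====

-- '-' → '_', identity elsewhere: the character map performed by A's replace
def pvMapc (c : Char) : Char := if c = '-' then '_' else c

-- single-char splitter: what splitOn (· on '_') computes, in structural form
def pvSplitChar : List Char → List (List Char)
  | [] => [[]]
  | c :: rest => if c = '_' then [] :: pvSplitChar rest else (pvSplitChar rest).modifyHead (c :: ·)

lemma pvMapc_eq_iff (c ch : Char) (h : ch ≠ '_') (h' : ch ≠ '-') : (ch = pvMapc c) ↔ ch = c := by
  unfold pvMapc
  by_cases hc : c = '-'
  · subst hc
    rw [if_pos rfl]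
    constructor
    · intro h1; exact absurd h1 h
    · intro h1; exact absurd h1 h'
  · simp [hc]

lemma pv_replace_go (fuel : Nat) : ∀ (l acc : List Char), l.length ≤ fuel →
    PySem.Chars.replace.go ['-'] ['_'] fuel l acc = acc.reverse ++ l.map pvMapc := by
  induction fuel with
  | zero =>
    intro l acc h
    have : l = [] := by cases l <;> simp_all
    subst this; simp [PySem.Chars.replace.go]
  | succ n ih =>
    intro l acc h
    cases l with
    | nil => simp [PySem.Chars.replace.go]
    | cons c t =>
      by_cases hc : c = '-'
      · subst hc
        simp [PySem.Chars.replace.go, List.isPrefixOf, ih t _ (by simpa using Nat.lt_succ_iff.mp (by simpa using h)), pvMapc]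
      · have hp : (['-'] : List Char).isPrefixOf (c :: t) = false := by
          simp [List.isPrefixOf]; exact fun h' => hc h'.symm
        simp [PySem.Chars.replace.go, hp, ih t _ (by simpa using Nat.lt_succ_iff.mp (by simpa using h)), pvMapc, hc]

lemma pv_replace_eq_map (l : List Char) :
    PySem.Chars.replace l ['-'] ['_'] = l.map pvMapc := by
  simp [PySem.Chars.replace, pv_replace_go l.length l [] (le_refl _)]

lemma pv_splitChar_ne_nil (l : List Char) : pvSplitChar l ≠ [] := by
  induction l with
  | nil => simp [pvSplitChar]
  | cons c t ih =>
    by_cases hc : c = '_' <;> simp only [pvSplitChar, hc, if_pos, ite_false]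
    · simp
    · cases h : pvSplitChar t with
      | nil => exact absurd h ih
      | cons a b => simp [List.modifyHead]

lemma pv_splitOn_go (fuel : Nat) : ∀ (l cur : List Char) (acc : List (List Char)), l.length ≤ fuel →
    PySem.Chars.splitOn.go ['_'] fuel l cur acc
      = acc.reverse ++ (pvSplitChar l).modifyHead (cur.reverse ++ ·) := by
  induction fuel with
  | zero =>
    intro l cur acc h
    have : l = [] := by cases l <;> simp_all
    subst this; simp [PySem.Chars.splitOn.go, pvSplitChar, List.modifyHead]
  | succ n ih =>
    intro l cur acc h
    cases l with
    | nil => simp [PySem.Chars.splitOn.go, pvSplitChar, List.modifyHead]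
    | cons c t =>
      have ht : t.length ≤ n := by simpa using Nat.lt_succ_iff.mp (by simpa using h)
      by_cases hc : c = '_'
      · subst hc
        rw [show PySem.Chars.splitOn.go ['_'] (n+1) ('_' :: t) cur acc
              = PySem.Chars.splitOn.go ['_'] n t [] (cur.reverse :: acc) by
            simp [PySem.Chars.splitOn.go, List.isPrefixOf]]
        rw [ih t [] _ ht]
        cases hs : pvSplitChar t with
        | nil => exact absurd hs (pv_splitChar_ne_nil t)
        | cons a b => simp [pvSplitChar, hs, List.modifyHead]
      · have hp : (['_'] : List Char).isPrefixOf (c :: t) = false := by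
          simp [List.isPrefixOf]; exact fun h' => hc h'.symm
        rw [show PySem.Chars.splitOn.go ['_'] (n+1) (c :: t) cur acc
              = PySem.Chars.splitOn.go ['_'] n t (c :: cur) acc by
            simp [PySem.Chars.splitOn.go, hp]]
        rw [ih t (c :: cur) _ ht]
        cases hs : pvSplitChar t with
        | nil => exact absurd hs (pv_splitChar_ne_nil t)
        | cons a b => simp [pvSplitChar, hc, hs, List.modifyHead]

lemma pv_splitOn_eq (l : List Char) :
    PySem.Chars.splitOn l ['_'] = pvSplitChar l := by
  rw [PySem.Chars.splitOn, pv_splitOn_go (l.length + 1) l [] [] (by omega)]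
  cases hs : pvSplitChar l with
  | nil => exact absurd hs (pv_splitChar_ne_nil l)
  | cons a b => simp [List.modifyHead]

-- B's one-pass scanner computes 'some produced token is in the 5-token set'
lemma pv_scan_eq (l : List Char) : ∀ (tok : List Char),
    pvScanTd l tok = ((pvSplitChar (l.map pvMapc)).modifyHead (tok ++ ·)).any pvIsTdRest := by
  induction l with
  | nil => intro tok; simp [pvScanTd, pvSplitChar, List.modifyHead]
  | cons c rest ih =>
    intro tok
    by_cases hc : c = '-' ∨ c = '_'
    · have hm : pvMapc c = '_' := by
        rcases hc with rfl | rfl <;> simp [pvMapc]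
      have hcb : (c == '-' || c == '_') = true := by
        rcases hc with rfl | rfl <;> simp
      rw [show pvScanTd (c :: rest) tok = (pvIsTdRest tok || pvScanTd rest []) by
            simp [pvScanTd, hcb]]
      rw [ih []]
      cases hs : pvSplitChar (rest.map pvMapc) with
      | nil => exact absurd hs (pv_splitChar_ne_nil _)
      | cons a b => simp [pvSplitChar, hm, hs, List.modifyHead]
    · have hc1 : c ≠ '-' := fun h => hc (Or.inl h)
      have hc2 : c ≠ '_' := fun h => hc (Or.inr h)
      have hm : pvMapc c = c := by simp [pvMapc, hc1]
      have hcb : (c == '-' || c == '_') = false := by simp [hc1, hc2]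
      rw [show pvScanTd (c :: rest) tok = pvScanTd rest (tok ++ [c]) by
            simp [pvScanTd, hcb]]
      rw [ih (tok ++ [c])]
      cases hs : pvSplitChar (rest.map pvMapc) with
      | nil => exact absurd hs (pv_splitChar_ne_nil _)
      | cons a b => simp [pvSplitChar, hs, List.modifyHead, hm, hc2]

-- every token is an infix of the split string (its head even a prefix)
lemma pv_splitChar_infix (l : List Char) :
    (pvSplitChar l).headD [] <+: l ∧ ∀ t ∈ pvSplitChar l, t <:+: l := by
  induction l with
  | nil => simp [pvSplitChar]
  | cons c rest ih =>
    by_cases hc : c = '_'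
    · subst hc
      refine ⟨by simp [pvSplitChar], ?_⟩
      intro t ht
      have ht' : t = [] ∨ t ∈ pvSplitChar rest := by simpa [pvSplitChar] using ht
      rcases ht' with rfl | ht'
      · exact List.nil_infix
      · exact List.infix_cons (ih.2 t ht')
    · cases hs : pvSplitChar rest with
      | nil => exact absurd hs (pv_splitChar_ne_nil rest)
      | cons a b =>
        have hhead : a <+: rest := by
          have h1 := ih.1
          rw [hs] at h1
          simpa using h1
        have htail : ∀ t ∈ b, t <:+: rest := fun t ht =>
          ih.2 t (by rw [hs]; exact List.mem_cons_of_mem _ ht)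
        constructor
        · simp only [pvSplitChar, if_neg hc, hs, List.modifyHead, List.headD_cons]
          exact List.cons_prefix_cons.mpr ⟨rfl, hhead⟩
        · intro t ht
          simp only [pvSplitChar, if_neg hc, hs, List.modifyHead, List.mem_cons] at ht
          rcases ht with rfl | ht
          · exact (List.cons_prefix_cons.mpr ⟨rfl, hhead⟩).isInfix
          · exact List.infix_cons (htail t ht)

-- 'td' is an infix of the mapped string iff it is an infix of the original
lemma pv_td_infix_map (l : List Char) :
    (['t','d'] <:+: l.map pvMapc) ↔ ['t','d'] <:+: l := by
  induction l with
  | nil => simp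
  | cons c rest ih =>
    rw [List.map_cons, List.infix_cons_iff, List.infix_cons_iff, ih]
    have hd : (['d'] <+: rest.map pvMapc) ↔ ['d'] <+: rest := by
      cases rest with
      | nil => simp
      | cons d rest' =>
        rw [List.map_cons, List.cons_prefix_cons, List.cons_prefix_cons,
            pvMapc_eq_iff d 'd' (by decide) (by decide)]
        simp
    rw [List.cons_prefix_cons, List.cons_prefix_cons,
        pvMapc_eq_iff c 't' (by decide) (by decide), hd]

-- the TD decision: A's set intersection + substring = B's substring + one-pass scan
lemma pv_td_eq (ck : List Char) :
    (!(PySem.Set.inter (PySem.Set.ofList ((PySem.Chars.splitOn (PySem.Chars.replace ck ['-'] ['_']) ['_']).filter (fun t => !t.isEmpty))) pvTdTokensA).isEmpty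
      || PySem.Chars.isIn ['t','d'] ck)
    = (PySem.Chars.isIn ['t','d'] ck || pvScanTd ck []) := by
  rw [pv_replace_eq_map, pv_splitOn_eq, pv_scan_eq ck []]
  have hmod : (pvSplitChar (ck.map pvMapc)).modifyHead (([] : List Char) ++ ·)
      = pvSplitChar (ck.map pvMapc) := by
    cases hs : pvSplitChar (ck.map pvMapc) with
    | nil => rfl
    | cons a b => simp [List.modifyHead]
  rw [hmod]
  have hIn : PySem.Chars.isIn ['t','d'] ck = true ↔ ['t','d'] <:+: ck :=
    PySem.Chars.isIn_iff_infix _ _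
  have hInter : (!(PySem.Set.inter (PySem.Set.ofList ((pvSplitChar (ck.map pvMapc)).filter (fun t => !t.isEmpty))) pvTdTokensA).isEmpty) = true
      ↔ ∃ t ∈ pvSplitChar (ck.map pvMapc), t ≠ [] ∧ PySem.Set.contains pvTdTokensA t = true := by
    simp only [PySem.Set.inter, Bool.not_eq_eq_eq_not, Bool.not_true, List.isEmpty_eq_false_iff,
      ne_eq, List.filter_eq_nil_iff, PySem.Set.mem_ofList, List.mem_filter, not_forall]
    constructor
    · rintro ⟨x, ⟨hx, hne⟩, hT⟩
      exact ⟨x, hx, by simpa using hne, by simpa [PySem.Set.contains] using hT⟩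
    · rintro ⟨x, hx, hne, hT⟩
      exact ⟨x, ⟨hx, by simpa using hne⟩, by simpa [PySem.Set.contains] using hT⟩
  rw [Bool.eq_iff_iff, Bool.or_eq_true, Bool.or_eq_true, hInter, List.any_eq_true]
  constructor
  · rintro (⟨t, htmem, htne, htT⟩ | h)
    · have h8 : t ∈ [['t','d'], ['t','d','d','f','t'], ['t','d','-','d','f','t'], ['c','a','s','i','d','a'],
          ['a','b','s','o','r','p','t','i','o','n'], ['r','a','d','i','a','t','i','o','n'], ['e','e','l','s'], ['r','t']] := by
        simpa [pvTdTokensA, PySem.Set.contains, PySem.Set.mem_ofList] using htT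
      have hinf : t <:+: ck.map pvMapc := (pv_splitChar_infix (ck.map pvMapc)).2 t htmem
      simp only [List.mem_cons, List.not_mem_nil, or_false] at h8
      rcases h8 with rfl | rfl | rfl | rfl | rfl | rfl | rfl | rfl
      · exact Or.inl (hIn.mpr ((pv_td_infix_map ck).mp hinf))
      · exact Or.inl (hIn.mpr ((pv_td_infix_map ck).mp
          ((by decide : (['t','d'] : List Char) <:+: ['t','d','d','f','t']).trans hinf)))
      · exact Or.inl (hIn.mpr ((pv_td_infix_map ck).mp
          ((by decide : (['t','d'] : List Char) <:+: ['t','d','-','d','f','t']).trans hinf)))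
      · exact Or.inr ⟨_, htmem, by decide⟩
      · exact Or.inr ⟨_, htmem, by decide⟩
      · exact Or.inr ⟨_, htmem, by decide⟩
      · exact Or.inr ⟨_, htmem, by decide⟩
      · exact Or.inr ⟨_, htmem, by decide⟩
    · exact Or.inl h
  · rintro (h | ⟨t, htmem, ht5⟩)
    · exact Or.inr h
    · refine Or.inl ⟨t, htmem, ?_, ?_⟩
      · revert ht5; unfold pvIsTdRest
        intro h5
        simp only [Bool.or_eq_true, beq_iff_eq] at h5
        rcases h5 with (((rfl | rfl) | rfl) | rfl) | rfl <;> simp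
      · revert ht5; unfold pvIsTdRest
        intro h5
        simp only [Bool.or_eq_true, beq_iff_eq] at h5
        rcases h5 with (((rfl | rfl) | rfl) | rfl) | rfl <;> decide

-- ===== the molecule side (first '_'-segment characterisation, as before) =====

-- split('_', 1) with maxsplit exhausted: the rest of the string is the final piece
lemma pv_go_zero (sep : List Char) (fuel : Nat) (l cur : List Char) (acc : List (List Char)) :
    PySem.Chars.splitOnMax.go sep fuel 0 l cur acc = ((cur.reverse ++ l) :: acc).reverse := by
  cases fuel with
  | zero => simp [PySem.Chars.splitOnMax.go]
  | succ n => cases l <;> simp [PySem.Chars.splitOnMax.go]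

-- with maxsplit = 1 the first piece produced is the text before the first '_'
lemma pv_go_one (fuel : Nat) : ∀ (l cur : List Char), l.length ≤ fuel →
    ∃ rest, PySem.Chars.splitOnMax.go ['_'] fuel 1 l cur [] =
      (cur.reverse ++ l.takeWhile (fun c => c != '_')) :: rest := by
  induction fuel with
  | zero =>
    intro l cur h
    have : l = [] := by cases l <;> simp_all
    subst this
    exact ⟨[], by simp [PySem.Chars.splitOnMax.go]⟩
  | succ n ih =>
    intro l cur h
    cases l with
    | nil => exact ⟨[], by simp [PySem.Chars.splitOnMax.go]⟩
    | cons c rest =>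
      by_cases hc : c = '_'
      · subst hc
        refine ⟨[rest], ?_⟩
        simp [PySem.Chars.splitOnMax.go, List.isPrefixOf, pv_go_zero]
      · obtain ⟨r, hr⟩ := ih rest (c :: cur) (by simpa using Nat.lt_succ_iff.mp (by simpa using h))
        refine ⟨r, ?_⟩
        have hpre : (['_'] : List Char).isPrefixOf (c :: rest) = false := by
          simp [List.isPrefixOf]; exact fun h' => hc h'.symm
        simp [PySem.Chars.splitOnMax.go, hpre, hr, hc]

-- case_key.split('_', 1)[0] is the prefix of case_key before the first '_'
lemma pv_first_eq (ck : List Char) :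
    (PySem.Chars.splitOnMax ck ['_'] 1).headD [] = ck.takeWhile (fun c => c != '_') := by
  obtain ⟨rest, hr⟩ := pv_go_one (ck.length + 1) ck [] (by omega)
  simp [PySem.Chars.splitOnMax, hr]

lemma pv_takeWhile_key (k l : List Char) (h : '_' ∉ k) :
    (k ++ l).takeWhile (fun c => c != '_') = k ++ l.takeWhile (fun c => c != '_') := by
  induction k with
  | nil => simp
  | cons c t ih =>
    have hc : c ≠ '_' := fun hcc => h (hcc ▸ List.mem_cons_self)
    simp only [List.cons_append, List.takeWhile_cons]
    simp [hc, ih (fun hm => h (List.mem_cons_of_mem _ hm))]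

-- A's per-key test (startswith k+'_' or equality) is: the first '_'-segment equals k
lemma pv_cond_eq (ck k : List Char) (h : '_' ∉ k) :
    (PySem.Chars.startswith ck (k ++ ['_']) || ck == k)
      = (k == ck.takeWhile (fun c => c != '_')) := by
  rw [Bool.eq_iff_iff]
  simp only [Bool.or_eq_true, beq_iff_eq, PySem.Chars.startswith, List.isPrefixOf_iff_prefix]
  constructor
  · rintro (⟨r, rfl⟩ | rfl)
    · rw [List.append_assoc, pv_takeWhile_key _ _ h]
      simp
    · rw [List.takeWhile_eq_self_iff.mpr]
      intro x hx
      simpa using fun hxx : x = '_' => h (hxx ▸ hx)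
  · intro hk
    have hsplit := List.takeWhile_append_dropWhile (p := fun c => c != '_') (l := ck)
    cases hd : ck.dropWhile (fun c => c != '_') with
    | nil => right; rw [← hsplit, hd, ← hk]; simp
    | cons c d =>
      left
      have hpc := List.head?_dropWhile_not (fun c => c != '_') ck
      rw [hd] at hpc
      simp at hpc
      refine ⟨d, ?_⟩
      rw [← hsplit, hd, ← hk, hpc]
      simp

-- the dead "he_pp" entry: whenever its test fires, the "he" entry already fired
lemma pv_hepp (ck : List Char)
    (h : PySem.Chars.startswith ck (['h','e','_','p','p'] ++ ['_']) || ck == ['h','e','_','p','p']) :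
    (['h','e'] == ck.takeWhile (fun c => c != '_')) = true := by
  simp only [Bool.or_eq_true, beq_iff_eq, PySem.Chars.startswith, List.isPrefixOf_iff_prefix] at h
  rcases h with ⟨r, hr⟩ | rfl
  · rw [← hr]
    simp
  · decide

lemma pv_collapse {α : Type} (c2 c3 : Prop) [Decidable c2] [Decidable c3] (a x : α) (h : c3 → c2) :
    (if c2 then a else if c3 then a else x) = if c2 then a else x := by
  by_cases hc : c2
  · simp [hc]
  · have h3 : ¬ c3 := fun hc3 => hc (h hc3)
    simp [hc, h3]

-- the equality-if chain left by the scan equals B's match on the segment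
lemma pv_match_eq (f : List Char) :
    (if ['h'] == f then "H" else if ['h','e'] == f then "He" else if ['n'] == f then "N"
     else if ['n','a'] == f then "Na" else if ['k'] == f then "K" else if ['c','l'] == f then "Cl"
     else if ['o'] == f then "O" else if ['c'] == f then "C" else if ['f'] == f then "F"
     else if ['s'] == f then "S" else "H2") = pvMoleculeOf f := by
  unfold pvMoleculeOf
  split_ifs
  all_goals simp only [beq_iff_eq] at *
  all_goals first
    | (subst_eqs; rfl)
    | (split <;> simp_all)

-- molecule: A's scan over the 11 keys equals B's match on the first '_'-segment
set_option maxHeartbeats 2000000 in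
lemma pv_mol_eq (ck : List Char) :
    pvAtomLoopA ck pvAtomsA = pvMoleculeOf (ck.takeWhile (fun c => c != '_')) := by
  simp only [pvAtomsA, pvAtomLoopA]
  rw [pv_cond_eq ck ['h'] (by decide), pv_cond_eq ck ['h','e'] (by decide),
      pv_cond_eq ck ['n'] (by decide), pv_cond_eq ck ['n','a'] (by decide),
      pv_cond_eq ck ['k'] (by decide), pv_cond_eq ck ['c','l'] (by decide),
      pv_cond_eq ck ['o'] (by decide), pv_cond_eq ck ['c'] (by decide),
      pv_cond_eq ck ['f'] (by decide), pv_cond_eq ck ['s'] (by decide)]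
  rw [pv_collapse _ _ _ _ (fun h3 => pv_hepp ck h3)]
  exact pv_match_eq _

-- ===== VERDICT (by name: the statement is the Claim_ definition above) =====
theorem infer_octopus_defaults_for_case_spec : Claim_equal_infer_octopus_defaults_for_case := by
  intro case_id _
  unfold Spec_infer_octopus_defaults_for_case
  unfold infer_octopus_defaults_for_case infer_octopus_defaults_for_case_alt
  dsimp only
  rw [pv_first_eq, pv_mol_eq, pv_td_eq]
  set ck := PySem.Chars.lower (PySem.Chars.strip case_id.toList)
  by_cases h : PySem.Chars.isIn ['t','d'] ck = true <;> simp [h]
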